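-- pv_equiv track=rewrite | github.com/finalbossqc/GramBin | main.py | gen_gram
-- ===== SOURCE A (Python) =====
-- def gen_gram(S: str):
--   d = []
--   f = ""
--   for i in range(len(S)):
--     f += S[i]
--     if f not in S[0:i]:
--       d.append(str(f))
--       f=""
--   return d
-- ===== SOURCE B (Python) =====
-- def gen_gram(S):
--     n = len(S)
--     out = []
--     j = 0
--     while j < n:
--         i = j
--         while i < n and S[:i].find(S[j:i+1]) != -1:
--             i += 1
--         if i == n:
--             break
--         out.append(S[j:i + 1])
--         j = i + 1
--     return out
-- ===== Notes on version B (the rewrite author's own statement) =====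
-- stated objective: alternative
-- what changed: Index-based nested-loop factorizer: an outer loop over factor start positions and an inner loop that extends the factor while prefix.find locates it, emitting slices directly, instead of A's single fold that rebuilds an accumulator string and tests substring membership at every index.
import Mathlib
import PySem

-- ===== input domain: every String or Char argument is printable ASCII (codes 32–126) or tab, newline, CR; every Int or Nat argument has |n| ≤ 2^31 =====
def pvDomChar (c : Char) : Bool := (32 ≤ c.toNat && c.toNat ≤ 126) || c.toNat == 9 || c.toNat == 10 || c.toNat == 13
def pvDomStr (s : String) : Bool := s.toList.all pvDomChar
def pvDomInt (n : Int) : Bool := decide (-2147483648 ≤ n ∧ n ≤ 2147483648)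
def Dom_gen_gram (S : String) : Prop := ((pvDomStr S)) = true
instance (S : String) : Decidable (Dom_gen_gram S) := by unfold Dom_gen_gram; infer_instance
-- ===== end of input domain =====

-- B replaces A's accumulator-string fold by an index-based outer/inner loop over factor
-- start positions using prefix.find on slices (objective: alternative; same cost).

-- ===== PORT A =====
-- loop body of A's 'for i in range(len(S))'
def genGramStep (cs : List Char) (st : List String × List Char) (i : Int) : List String × List Char :=
  let f := st.2 ++ [PySem.List.pyGetD cs i ' ']
  if !PySem.Chars.isIn f (PySem.List.slice cs (some 0) (some i)) then
    (st.1 ++ [String.ofList f], [])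
  else
    (st.1, f)

def gen_gram (S : String) : List String :=
  (((PySem.List.pyRange 0 (PySem.Str.len S) 1).foldl (genGramStep S.toList) ([], []))).1

-- ===== PORT B =====
-- inner 'while i < n and S[:i].find(S[j:i+1]) != -1: i += 1' of Source B; returns the final i
def genGramInner (cs : List Char) (j i : Nat) : Nat :=
  if i < cs.length ∧
     PySem.Chars.find (PySem.List.slice cs none (some (i : Int)))
       (PySem.List.slice cs (some (j : Int)) (some ((i + 1 : Nat) : Int))) ≠ -1 then
    genGramInner cs j (i + 1)
  else i
termination_by cs.length - i
decreasing_by omega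

-- the inner loop never moves i backwards (needed for the outer loop's termination)
theorem genGramInner_ge (cs : List Char) (j i : Nat) : i ≤ genGramInner cs j i := by
  fun_induction genGramInner with
  | case1 _ _ ih => omega
  | case2 => omega

-- outer 'while j < n' of Source B, building the output front-to-back as a cons list
def genGramOuter (cs : List Char) (j : Nat) : List String :=
  if _h : j < cs.length then
    let i := genGramInner cs j j
    if i = cs.length then []  -- break: trailing factor still occurs in the prefix
    else
      String.ofList (PySem.List.slice cs (some (j : Int)) (some ((i + 1 : Nat) : Int))) ::
        genGramOuter cs (i + 1)
  else []
termination_by cs.length - j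
decreasing_by have := genGramInner_ge cs j j; omega

def gen_gram_alt (S : String) : List String := genGramOuter S.toList 0

-- ===== PRECONDITION & SPEC =====
def Spec_gen_gram (S : String) (out : List String) : Prop := out = gen_gram_alt S
instance (S : String) (out : List String) : Decidable (Spec_gen_gram S out) := by unfold Spec_gen_gram; infer_instance

-- ===== CLAIM (what is proved, stated in full; the proofs are below) =====
def Claim_equal_gen_gram : Prop := ∀ (S : String), Dom_gen_gram S → Spec_gen_gram S (gen_gram S)

-- ===== LEMMAS AND PROOFS =====

theorem gen_gram_loop (cs : List Char) :
    ∀ (k i j : Nat) (d : List String), j ≤ i → cs.length = i + k →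
    (((PySem.List.pyRange (i : Int) ((cs.length : Nat) : Int) 1).foldl (genGramStep cs)
        (d, (cs.take i).drop j))).1 =
      d ++ (if genGramInner cs j i = cs.length then []
            else
              String.ofList (PySem.List.slice cs (some (j : Int))
                  (some ((genGramInner cs j i + 1 : Nat) : Int))) ::
                genGramOuter cs (genGramInner cs j i + 1)) := by
  intro k
  induction k with
  | zero =>
    intro i j d hji hlen
    have hi : i = cs.length := by omega
    have hinner : genGramInner cs j i = i := by
      rw [genGramInner, if_neg (by rintro ⟨h, -⟩; omega)]
    rw [PySem.List.pyRange_one_eq_nil (by exact_mod_cast Nat.le_of_eq hi.symm),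
      hinner, if_pos hi]
    simp
  | succ k ih =>
    intro i j d hji hlen
    have hi : i < cs.length := by omega
    have hf : (cs.take i).drop j ++ [cs.getD i ' '] = (cs.take (i+1)).drop j := by
      rw [List.take_add_one, List.getElem?_eq_getElem hi, List.getD_eq_getElem cs ' ' hi,
        Option.toList_some, List.drop_append_of_le_length (by simp; omega)]
    have hsl : PySem.List.slice cs (some (j : Int)) (some ((i + 1 : Nat) : Int))
        = (cs.take (i+1)).drop j := by
      rw [PySem.List.slice_natCast, List.drop_take]
    have hcast : ((i : Int) + 1) = ((i + 1 : Nat) : Int) := by push_cast; ring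
    rw [PySem.List.pyRange_one_cons (by exact_mod_cast hi), List.foldl_cons, hcast]
    by_cases hocc : (cs.take (i+1)).drop j <:+: cs.take i
    · have hIn : PySem.Chars.isIn ((cs.take (i+1)).drop j) (cs.take i) = true :=
        (PySem.Chars.isIn_iff_infix _ _).mpr hocc
      have hstep : genGramStep cs (d, (cs.take i).drop j) (i : Int)
          = (d, (cs.take (i+1)).drop j) := by
        unfold genGramStep
        simp only [PySem.List.pyGetD_natCast, PySem.List.slice_zero_start,
          PySem.List.slice_to_natCast, List.getD_eq_getElem?_getD]
        rw [show (cs.take i).drop j ++ [cs[i]?.getD ' '] = (cs.take (i+1)).drop j by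
          rw [← hf, List.getD_eq_getElem?_getD]]
        simp [hIn]
      rw [hstep, ih (i+1) j d (by omega) (by omega)]
      have hinner : genGramInner cs j i = genGramInner cs j (i+1) := by
        rw [genGramInner, if_pos ⟨hi, by
          rw [PySem.List.slice_to_natCast, hsl]
          exact (PySem.Chars.find_ne_neg_one_iff _ _).mpr hocc⟩]
      rw [hinner]
    · have hIn : PySem.Chars.isIn ((cs.take (i+1)).drop j) (cs.take i) = false :=
        (PySem.Chars.isIn_eq_false_iff _ _).mpr hocc
      have hstep : genGramStep cs (d, (cs.take i).drop j) (i : Int)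
          = (d ++ [String.ofList ((cs.take (i+1)).drop j)], (cs.take (i+1)).drop (i+1)) := by
        unfold genGramStep
        simp only [PySem.List.pyGetD_natCast, PySem.List.slice_zero_start,
          PySem.List.slice_to_natCast, List.getD_eq_getElem?_getD]
        rw [show (cs.take i).drop j ++ [cs[i]?.getD ' '] = (cs.take (i+1)).drop j by
          rw [← hf, List.getD_eq_getElem?_getD]]
        simp [hIn]
      rw [hstep, ih (i+1) (i+1) (d ++ [String.ofList ((cs.take (i+1)).drop j)]) le_rfl (by omega)]
      have hinner : genGramInner cs j i = i := by
        rw [genGramInner, if_neg (by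
          rintro ⟨-, hfind⟩
          apply hfind
          rw [PySem.List.slice_to_natCast, hsl]
          exact (PySem.Chars.find_eq_neg_one_iff _ _).mpr hocc)]
      rw [hinner, if_neg (show ¬ i = cs.length by omega), hsl]
      have houter : (if genGramInner cs (i+1) (i+1) = cs.length then []
          else
            String.ofList (PySem.List.slice cs (some ((i+1 : Nat) : Int))
                (some ((genGramInner cs (i+1) (i+1) + 1 : Nat) : Int))) ::
              genGramOuter cs (genGramInner cs (i+1) (i+1) + 1)) = genGramOuter cs (i+1) := by
        by_cases h2 : i + 1 < cs.length
        · conv_rhs => rw [genGramOuter]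
          rw [dif_pos h2]
        · conv_rhs => rw [genGramOuter]
          rw [dif_neg h2]
          have h3 : genGramInner cs (i+1) (i+1) = i + 1 := by
            rw [genGramInner, if_neg (by rintro ⟨h3, -⟩; omega)]
          rw [h3, if_pos (by omega)]
      rw [houter, List.append_assoc, List.singleton_append]

theorem gen_gram_top (S : String) :
    (((PySem.List.pyRange 0 (PySem.Str.len S) 1).foldl (genGramStep S.toList) ([], []))).1
      = genGramOuter S.toList 0 := by
  have h := gen_gram_loop S.toList S.toList.length 0 0 [] le_rfl (by omega)
  simp only [List.take_zero, List.drop_nil, Nat.cast_zero, List.nil_append] at h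
  rw [show PySem.Str.len S = ((S.toList.length : Nat) : Int) from by simp [pysem], h]
  by_cases h0 : 0 < S.toList.length
  · conv_rhs => rw [genGramOuter]
    rw [dif_pos h0]
    simp
  · conv_rhs => rw [genGramOuter]
    rw [dif_neg h0]
    have hin : genGramInner S.toList 0 0 = 0 := by
      rw [genGramInner, if_neg (by rintro ⟨h1, -⟩; omega)]
    rw [hin, if_pos (by omega)]

-- ===== VERDICT (by name: the statement is the Claim_ definition above) =====
theorem gen_gram_spec : Claim_equal_gen_gram := by
  intro S _
  unfold Spec_gen_gram gen_gram gen_gram_alt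
  exact gen_gram_top S
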